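-- pv_equiv track=rewrite | github.com/SamuelMatthew95/trading-control | tests/core/test_production_schema_guardrails.py | _sql_block_after
-- ===== SOURCE A (Python) =====
-- def _sql_block_after(source: str, keyword: str) -> str:
--     """Return the text from `keyword` to the next INSERT / UPDATE / end."""
--     idx = source.find(keyword)
--     if idx == -1:
--         return ""
--     snippet = source[idx:]
--     # Cut at the next top-level statement keyword
--     for stop in ["INSERT INTO", "UPDATE ", "SELECT ", "DELETE "]:
--         next_kw = snippet.find(stop, len(keyword))
--         if next_kw != -1:
--             snippet = snippet[:next_kw]
--     return snippet
-- ===== SOURCE B (Python) =====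
-- _STOPS = ("INSERT INTO", "UPDATE ", "SELECT ", "DELETE ")
--
--
-- def _sql_block_after(source: str, keyword: str) -> str:
--     """Return the text from `keyword` to the next INSERT / UPDATE / end."""
--     idx = source.find(keyword)
--     if idx == -1:
--         return ""
--     snippet = source[idx:]
--     # Single left-to-right scan: cut at the first position where any stop keyword starts
--     for i in range(len(keyword), len(snippet)):
--         for stop in _STOPS:
--             if snippet.startswith(stop, i):
--                 return snippet[:i]
--     return snippet
-- ===== Notes on version B (the rewrite author's own statement) =====
-- stated objective: alternative
-- what changed: Replaced A's four sequential find-and-truncate passes (one full substring search per stop keyword, each re-truncating the snippet) by a single left-to-right scan that returns at the first position >= len(keyword) where any of the four stop keywords starts.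
import Mathlib
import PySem

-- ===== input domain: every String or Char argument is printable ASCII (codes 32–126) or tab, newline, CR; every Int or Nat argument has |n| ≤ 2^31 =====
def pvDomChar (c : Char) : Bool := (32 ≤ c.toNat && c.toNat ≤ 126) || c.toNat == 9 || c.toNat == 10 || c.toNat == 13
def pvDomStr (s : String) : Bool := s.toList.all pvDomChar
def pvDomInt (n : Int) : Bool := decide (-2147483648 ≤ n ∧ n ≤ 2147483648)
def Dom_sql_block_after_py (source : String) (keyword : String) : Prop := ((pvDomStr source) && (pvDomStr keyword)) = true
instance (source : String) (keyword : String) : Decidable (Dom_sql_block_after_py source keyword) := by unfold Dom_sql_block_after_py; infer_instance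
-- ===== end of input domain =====

-- B replaces A's four sequential find-and-truncate passes over the snippet by a single
-- left-to-right scan that cuts at the first position where any stop keyword starts
-- (alternative decomposition; no speed claim).

-- the four stop keywords, shared verbatim by both programs
def sqlStops : List (List Char) :=
  [['I','N','S','E','R','T',' ','I','N','T','O'],
   ['U','P','D','A','T','E',' '],
   ['S','E','L','E','C','T',' '],
   ['D','E','L','E','T','E',' ']]

-- ===== PORT A =====
-- one iteration of A's loop: next_kw = snippet.find(stop, kwlen); if != -1: snippet = snippet[:next_kw]
def sqlAStep (kwlen : Nat) (snippet : List Char) (stop : List Char) : List Char :=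
  let nextKw := PySem.Chars.findFrom snippet stop (kwlen : Int) none
  if nextKw ≠ -1 then PySem.List.slice snippet none (some nextKw) else snippet

def sql_block_after_py (source : String) (keyword : String) : String :=
  let idx := PySem.Str.find source keyword
  if idx = -1 then ""
  else
    let snippet := PySem.List.slice source.toList (some idx) none
    String.ofList (sqlStops.foldl (sqlAStep keyword.toList.length) snippet)

-- ===== PORT B =====
-- B's inner loop body: any stop starts at position i (snippet.startswith(stop, i))
def sqlHit (snippet : List Char) (i : Nat) : Bool :=
  sqlStops.any (fun stop => PySem.Chars.startswith (snippet.drop i) stop)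

-- B's scan: for i in range(start, len(snippet)): if hit: return snippet[:i]; fall through: snippet
def sqlScan (snippet : List Char) (i : Nat) : List Char :=
  if _h : i < snippet.length then
    if sqlHit snippet i then snippet.take i
    else sqlScan snippet (i + 1)
  else snippet
termination_by snippet.length - i

def sql_block_after_py_alt (source : String) (keyword : String) : String :=
  let idx := PySem.Str.find source keyword
  if idx = -1 then ""
  else
    let snippet := PySem.List.slice source.toList (some idx) none
    String.ofList (sqlScan snippet keyword.toList.length)

-- ===== PRECONDITION & SPEC =====
def Spec_sql_block_after_py (source : String) (keyword : String) (out : String) : Prop := out = sql_block_after_py_alt source keyword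
instance (source : String) (keyword : String) (out : String) : Decidable (Spec_sql_block_after_py source keyword out) := by unfold Spec_sql_block_after_py; infer_instance

-- ===== CLAIM (what is proved, stated in full; the proofs are below) =====
def Claim_equal_sql_block_after_py : Prop := ∀ (source : String) (keyword : String), Dom_sql_block_after_py source keyword → Spec_sql_block_after_py source keyword (sql_block_after_py source keyword)

-- ===== LEMMAS AND PROOFS =====

-- c is a valid "current cut point" for snippet s and search start k
def SqlCut (s : List Char) (k c : Nat) : Prop :=
  k ≤ c ∧ c ≤ s.length ∧ (c = s.length ∨ ∃ t ∈ sqlStops, t <+: s.drop c)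

-- no stop keyword begins strictly inside another stop keyword (finite check)
theorem sqlStops_noStraddle :
    ∀ t ∈ sqlStops, ∀ t' ∈ sqlStops, ∀ d ∈ List.range t.length,
      0 < d → ¬ (t.drop d <+: t' ∨ t' <+: t.drop d) := by decide

-- hence no stop occurrence can straddle a stop occurrence at c
theorem no_middle_occ {s t t' : List Char} (ht : t ∈ sqlStops) (ht' : t' ∈ sqlStops)
    {i c : Nat} (hi : t <+: s.drop i) (hc : t' <+: s.drop c)
    (h1 : i < c) (h2 : c < i + t.length) : False := by
  obtain ⟨r, hr⟩ := hi
  have hd : s.drop c = t.drop (c - i) ++ r := by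
    have h3 : s.drop c = (s.drop i).drop (c - i) := by
      rw [List.drop_drop]; congr 1; omega
    rw [h3, ← hr, List.drop_append_of_le_length (by omega)]
  have hor : t' <+: t.drop (c - i) ∨ t.drop (c - i) <+: t' := by
    have h4 : t.drop (c - i) <+: s.drop c := hd ▸ List.prefix_append _ r
    exact List.prefix_or_prefix_of_prefix (hd ▸ hc) h4
  exact sqlStops_noStraddle t ht t' ht' (c - i) (List.mem_range.mpr (by omega)) (by omega) hor.symm

-- a stop occurrence in s strictly before a valid cut point c lies entirely before c,
-- so it is an occurrence in s.take c as well (and conversely)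
theorem occ_take_iff {s t : List Char} (ht : t ∈ sqlStops) {c i : Nat}
    (hc : c = s.length ∨ ∃ t' ∈ sqlStops, t' <+: s.drop c) (hic : i < c) :
    t <+: (s.take c).drop i ↔ t <+: s.drop i := by
  rw [List.drop_take, List.prefix_take_iff]
  constructor
  · exact And.left
  · intro h
    refine ⟨h, ?_⟩
    by_contra hlen
    rcases hc with hl | ⟨t', ht', hocc⟩
    · have h5 := h.length_le
      simp only [List.length_drop] at h5
      omega
    · exact no_middle_occ ht ht' h hocc hic (by omega)

-- one step of A's loop, on a snippet of the form s.take c with c a valid cut point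
theorem sqlAStep_take {s : List Char} {k c : Nat} {t : List Char} (ht : t ∈ sqlStops)
    (htne : t ≠ []) (hcut : SqlCut s k c) :
    ∃ c', sqlAStep k (s.take c) t = s.take c' ∧ SqlCut s k c' ∧ c' ≤ c ∧
      (∀ i, k ≤ i → i < c' → ¬ t <+: s.drop i) := by
  obtain ⟨hkc, hcl, hval⟩ := hcut
  have hlen : (s.take c).length = c := by simp [List.length_take]; omega
  have hk' : k ≤ (s.take c).length := by omega
  by_cases hf : PySem.Chars.findFrom (s.take c) t (k : Int) none = -1
  · -- not found: snippet unchanged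
    refine ⟨c, ?_, ⟨hkc, hcl, hval⟩, le_refl c, ?_⟩
    · simp [sqlAStep, hf]
    · intro i hki hic hocc
      have hocc' : t <+: (s.take c).drop i := (occ_take_iff ht hval hic).mpr hocc
      have hinf : t <:+: (s.take c).drop k := by
        have hdd : (s.take c).drop i = ((s.take c).drop k).drop (i - k) := by
          rw [List.drop_drop]; congr 1; omega
        exact hocc'.isInfix.trans (hdd ▸ (List.drop_suffix (i - k) _).isInfix)
      exact ((PySem.Chars.findFrom_natCast_eq_neg_one_iff _ t k hk').mp hf) hinf
  · obtain ⟨hge, hocc, hmin⟩ := PySem.Chars.findFrom_natCast_spec (s.take c) t k hk' hf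
    have h0f : 0 ≤ PySem.Chars.findFrom (s.take c) t (k : Int) none :=
      le_trans (Int.natCast_nonneg k) hge
    obtain ⟨g, hg⟩ := Int.eq_ofNat_of_zero_le h0f
    rw [hg] at hge hocc hmin
    simp only [Int.toNat_natCast] at hocc hmin
    have hkg : k ≤ g := by exact_mod_cast hge
    have hfc : g < c := by
      have := hocc.length_le
      simp only [List.length_drop, hlen] at this
      have htl : 0 < t.length := List.length_pos_iff.mpr htne
      omega
    refine ⟨g, ?_, ⟨hkg, by omega, Or.inr ⟨t, ht, (occ_take_iff ht hval hfc).mp hocc⟩⟩,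
      by omega, ?_⟩
    · have hne : ((g : Nat) : Int) ≠ -1 := by omega
      simp only [sqlAStep]
      rw [hg, if_pos hne, PySem.List.slice_to_natCast, List.take_take]
      congr 1; omega
    · intro i hki hig hocc2
      exact hmin i hki hig ((occ_take_iff ht hval (by omega)).mpr hocc2)

-- A's whole loop, generically over a sublist of the stop list
theorem sqlFold_take (stops : List (List Char)) (hsub : ∀ t ∈ stops, t ∈ sqlStops ∧ t ≠ [])
    {s : List Char} {k : Nat} (c : Nat) (hcut : SqlCut s k c) :
    ∃ c', stops.foldl (sqlAStep k) (s.take c) = s.take c' ∧ SqlCut s k c' ∧ c' ≤ c ∧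
      ∀ t ∈ stops, ∀ i, k ≤ i → i < c' → ¬ t <+: s.drop i := by
  induction stops generalizing c with
  | nil => exact ⟨c, rfl, hcut, le_refl c, by simp⟩
  | cons t rest ih =>
    obtain ⟨hts, htne⟩ := hsub t List.mem_cons_self
    obtain ⟨c1, h1, hcut1, hle1, hmin1⟩ := sqlAStep_take hts htne hcut
    obtain ⟨c', h', hcut', hle', hmin'⟩ :=
      ih (fun u hu => hsub u (List.mem_cons_of_mem t hu)) c1 hcut1
    refine ⟨c', ?_, hcut', le_trans hle' hle1, ?_⟩
    · simpa [List.foldl_cons, h1] using h'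
    · intro u hu i hki hic
      rcases List.mem_cons.mp hu with rfl | hu'
      · exact hmin1 i hki (by omega)
      · exact hmin' u hu' i hki hic

-- B's scan reaches exactly the minimal cut point
theorem sqlScan_take {s : List Char} {k c : Nat} (hcut : SqlCut s k c)
    (hmin : ∀ t ∈ sqlStops, ∀ i, k ≤ i → i < c → ¬ t <+: s.drop i) :
    ∀ n i, c - i = n → k ≤ i → i ≤ c → sqlScan s i = s.take c := by
  obtain ⟨hkc, hcl, hval⟩ := hcut
  intro n
  induction n with
  | zero =>
    intro i hn hki hic
    have hieq : i = c := by omega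
    subst hieq
    rcases hval with hl | ⟨t, ht, hocc⟩
    · rw [sqlScan, dif_neg (by omega)]
      exact (List.take_of_length_le (by omega)).symm
    · have hit : sqlHit s i = true := by
        simp only [sqlHit, List.any_eq_true]
        exact ⟨t, ht, (PySem.Chars.startswith_iff _ _).mpr hocc⟩
      have hlt : i < s.length := by
        have := hocc.length_le
        simp only [List.length_drop] at this
        have : 0 < t.length := by
          have : t ∈ sqlStops := ht
          fin_cases this <;> simp
        omega
      rw [sqlScan, dif_pos hlt, if_pos hit]
  | succ m ih =>
    intro i hn hki hic
    have hiltc : i < c := by omega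
    have hlt : i < s.length := by omega
    have hit : sqlHit s i = false := by
      simp only [sqlHit, List.any_eq_false]
      intro t ht
      simp only [PySem.Chars.startswith_iff]
      exact hmin t ht i hki hiltc
    rw [sqlScan, dif_pos hlt, if_neg (by simp [hit])]
    exact ih (i + 1) (by omega) (by omega) (by omega)

-- ===== VERDICT (by name: the statement is the Claim_ definition above) =====
theorem sql_block_after_py_spec : Claim_equal_sql_block_after_py := by
  unfold Claim_equal_sql_block_after_py Spec_sql_block_after_py
  intro source keyword _
  unfold sql_block_after_py sql_block_after_py_alt
  by_cases h : PySem.Str.find source keyword = -1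
  · rw [if_pos h, if_pos h]
  · rw [if_neg h, if_neg h]
    have hfind : PySem.Str.find source keyword
        = PySem.Chars.find source.toList keyword.toList := by
      simp [pysem]
    have h0 : 0 ≤ PySem.Chars.find source.toList keyword.toList := by
      have := PySem.Chars.neg_one_le_find source.toList keyword.toList
      rw [hfind] at h
      omega
    obtain ⟨hpre, -⟩ := PySem.Chars.find_spec h0
    set s : List Char := source.toList.drop (PySem.Chars.find source.toList keyword.toList).toNat
      with hsdef
    set k : Nat := keyword.toList.length with hkdef
    have hslice : PySem.List.slice source.toList (some (PySem.Str.find source keyword)) none = s := by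
      rw [hfind, ← Int.toNat_of_nonneg h0]
      exact PySem.List.slice_from_natCast source.toList _
    rw [hslice]
    have hk : k ≤ s.length := hpre.length_le
    have hcut0 : SqlCut s k s.length := ⟨hk, le_refl _, Or.inl rfl⟩
    obtain ⟨c, hfold, hcut, -, hmin⟩ :=
      sqlFold_take sqlStops (by decide) s.length hcut0
    rw [List.take_length] at hfold
    show String.ofList (List.foldl (sqlAStep k) s sqlStops) = String.ofList (sqlScan s k)
    rw [hfold, sqlScan_take hcut hmin (c - k) k rfl (le_refl k) hcut.1]
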